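-- pv_equiv track=rewrite | github.com/joey-torii/CPSC322-Final-Project | mysklearn/myutils.py | luminosity_bins
-- ===== SOURCE A (Python) =====
-- def luminosity_bins(data):
--     labels = []
--
--     for i in data:
--         if i < 85000:
--             labels.append("0-85000")
--         elif i < 170000:
--             labels.append("85001-170000")
--         elif i < 255000:
--             labels.append("170001-255000")
--         elif i < 340000:
--             labels.append("255001-340000")
--         else:
--             labels.append("greater than 340001")
--
--     return labels
-- ===== SOURCE B (Python) =====
-- import bisect
--
-- _BOUNDS = [85000, 170000, 255000, 340000]
-- _LABELS = ["0-85000", "85001-170000", "170001-255000",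
--            "255001-340000", "greater than 340001"]
--
-- def luminosity_bins(data):
--     return [_LABELS[bisect.bisect_right(_BOUNDS, i)] for i in data]
-- ===== Notes on version B (the rewrite author's own statement) =====
-- stated objective: idiomatic
-- what changed: Replaces the cascaded if/elif comparison chain by a binary-search table lookup: bisect_right over a sorted boundary list indexes into a parallel label table, and the explicit append loop becomes a comprehension.
import Mathlib
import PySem

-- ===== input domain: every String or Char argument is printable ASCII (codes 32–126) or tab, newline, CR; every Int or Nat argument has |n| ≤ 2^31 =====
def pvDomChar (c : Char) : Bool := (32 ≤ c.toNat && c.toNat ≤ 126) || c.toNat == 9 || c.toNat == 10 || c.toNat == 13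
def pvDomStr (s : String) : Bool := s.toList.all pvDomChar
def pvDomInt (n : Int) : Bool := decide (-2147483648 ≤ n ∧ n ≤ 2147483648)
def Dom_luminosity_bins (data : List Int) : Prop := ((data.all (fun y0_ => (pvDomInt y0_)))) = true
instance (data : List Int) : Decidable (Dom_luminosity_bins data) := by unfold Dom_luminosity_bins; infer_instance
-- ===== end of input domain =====

-- B replaces the if/elif chain by bisect_right over a sorted boundary list indexing a label table (idiomatic, same cost).
-- ===== PORT A =====
def luminosity_bins (data : List Int) : List String :=
  let labels : List String := []
  let labels := data.foldl (fun labels i =>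
    if i < 85000 then labels ++ ["0-85000"]
    else if i < 170000 then labels ++ ["85001-170000"]
    else if i < 255000 then labels ++ ["170001-255000"]
    else if i < 340000 then labels ++ ["255001-340000"]
    else labels ++ ["greater than 340001"]) labels
  labels

-- ===== PORT B =====
-- faithful port of CPython's bisect.bisect_right(a, x): binary search with lo/hi
def pvBisectRight (a : List Int) (x : Int) (lo hi : Nat) : Nat :=
  if lo < hi then
    let mid := (lo + hi) / 2
    if x < a.getD mid 0 then pvBisectRight a x lo mid
    else pvBisectRight a x (mid + 1) hi
  else lo
termination_by hi - lo
decreasing_by all_goals omega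

def pvBounds : List Int := [85000, 170000, 255000, 340000]
def pvLabels : List String :=
  ["0-85000", "85001-170000", "170001-255000", "255001-340000", "greater than 340001"]

def luminosity_bins_alt (data : List Int) : List String :=
  data.map (fun i => pvLabels.getD (pvBisectRight pvBounds i 0 pvBounds.length) "")

-- ===== PRECONDITION & SPEC =====
def Spec_luminosity_bins (data : List Int) (out : List String) : Prop := out = luminosity_bins_alt data
instance (data : List Int) (out : List String) : Decidable (Spec_luminosity_bins data out) := by unfold Spec_luminosity_bins; infer_instance

-- ===== CLAIM (what is proved, stated in full; the proofs are below) =====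
def Claim_equal_luminosity_bins : Prop := ∀ (data : List Int), Dom_luminosity_bins data → Spec_luminosity_bins data (luminosity_bins data)

-- ===== LEMMAS AND PROOFS =====

def pvChain (i : Int) : String :=
  if i < 85000 then "0-85000"
  else if i < 170000 then "85001-170000"
  else if i < 255000 then "170001-255000"
  else if i < 340000 then "255001-340000"
  else "greater than 340001"

theorem pvBisect_eq_chain (i : Int) :
    pvLabels.getD (pvBisectRight pvBounds i 0 pvBounds.length) "" = pvChain i := by
  unfold pvChain pvBounds pvLabels
  by_cases h1 : i < 85000
  · have a2 : i < 170000 := by omega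
    have a3 : i < 255000 := by omega
    simp [pvBisectRight, h1, a2, a3]
  · by_cases h2 : i < 170000
    · have a3 : i < 255000 := by omega
      simp [pvBisectRight, h1, h2, a3]
    · by_cases h3 : i < 255000
      · simp [pvBisectRight, h1, h2, h3]
      · by_cases h4 : i < 340000
        · simp [pvBisectRight, h1, h2, h3, h4]
        · simp [pvBisectRight, h1, h2, h3, h4]

theorem pvFoldl_append (data : List Int) (acc : List String) :
    data.foldl (fun labels i => labels ++ [pvChain i]) acc = acc ++ data.map pvChain := by
  induction data generalizing acc with
  | nil => simp
  | cons x xs ih => simp [ih]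

theorem pvA_eq (data : List Int) :
    luminosity_bins data = data.map pvChain := by
  have h : (fun (labels : List String) (i : Int) =>
      if i < 85000 then labels ++ ["0-85000"]
      else if i < 170000 then labels ++ ["85001-170000"]
      else if i < 255000 then labels ++ ["170001-255000"]
      else if i < 340000 then labels ++ ["255001-340000"]
      else labels ++ ["greater than 340001"])
      = fun labels i => labels ++ [pvChain i] := by
    funext labels i
    simp only [pvChain]
    split_ifs <;> rfl
  unfold luminosity_bins
  rw [h]
  show (data.foldl (fun labels i => labels ++ [pvChain i]) []) = _
  rw [pvFoldl_append]
  simp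

-- ===== VERDICT (by name: the statement is the Claim_ definition above) =====
theorem luminosity_bins_spec : Claim_equal_luminosity_bins := by
  intro data _
  unfold Spec_luminosity_bins luminosity_bins_alt
  rw [pvA_eq]
  exact List.map_congr_left (fun i _ => (pvBisect_eq_chain i).symm)
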